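-- pv_equiv track=rewrite | github.com/fchaudhryspear/openclaw-skills | nexdev/test_generator.py | _generate_sample_inputs
-- ===== SOURCE A (Python) =====
-- from typing import Dict, Any, List, Optional
--
-- def _generate_sample_inputs(params: List[str], return_type: str) -> Dict[str, Any]:
--     """Generate sample input values based on parameter hints."""
--     samples = {}
--
--     for param in params:
--         param_lower = param.lower()
--
--         # Simple heuristics for common parameter names
--         if any(x in param_lower for x in ['id', 'num', 'count', 'qty', 'amount']):
--             if 'float' in return_type.lower() if return_type else False:
--                 samples[param] = "3.14"
--             else:
--                 samples[param] = "42"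
--         elif any(x in param_lower for x in ['name', 'title', 'desc', 'text', 'msg']):
--             samples[param] = "'test'"
--         elif any(x in param_lower for x in ['email', 'mail']):
--             samples[param] = "'test@example.com'"
--         elif any(x in param_lower for x in ['url', 'link', 'path']):
--             samples[param] = "'https://example.com'"
--         elif any(x in param_lower for x in ['flag', 'active', 'enabled', 'is_']):
--             samples[param] = "True"
--         elif any(x in param_lower for x in ['items', 'list', 'array', 'data']):
--             samples[param] = "[1, 2, 3]"
--         else:
--             samples[param] = "None"
--
--     return samples
-- ===== SOURCE B (Python) =====
-- def _generate_sample_inputs(params, return_type):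
--     """Generate sample input values based on parameter hints (rule-major staged passes)."""
--     num_val = "3.14" if return_type and 'float' in return_type.lower() else "42"
--     rules = [
--         (('id', 'num', 'count', 'qty', 'amount'), num_val),
--         (('name', 'title', 'desc', 'text', 'msg'), "'test'"),
--         (('email', 'mail'), "'test@example.com'"),
--         (('url', 'link', 'path'), "'https://example.com'"),
--         (('flag', 'active', 'enabled', 'is_'), "True"),
--         (('items', 'list', 'array', 'data'), "[1, 2, 3]"),
--     ]
--     lowers = [p.lower() for p in params]
--     vals = ["None"] * len(params)
--     # sweep rules last-to-first: overwriting makes the earliest matching rule win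
--     for keywords, value in reversed(rules):
--         vals = [value if any(k in pl for k in keywords) else w
--                 for pl, w in zip(lowers, vals)]
--     return dict(zip(params, vals))
-- ===== Notes on version B (the rewrite author's own statement) =====
-- stated objective: alternative
-- what changed: B is rule-major instead of parameter-major: it builds a parallel values list initialized to 'None' and sweeps the keyword rule groups in reverse order, each sweep overwriting the slots of matching parameters (so the earliest rule wins by overwriting last), then zips params with values into the dict; A walks each parameter once through an if/elif chain.
import Mathlib
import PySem

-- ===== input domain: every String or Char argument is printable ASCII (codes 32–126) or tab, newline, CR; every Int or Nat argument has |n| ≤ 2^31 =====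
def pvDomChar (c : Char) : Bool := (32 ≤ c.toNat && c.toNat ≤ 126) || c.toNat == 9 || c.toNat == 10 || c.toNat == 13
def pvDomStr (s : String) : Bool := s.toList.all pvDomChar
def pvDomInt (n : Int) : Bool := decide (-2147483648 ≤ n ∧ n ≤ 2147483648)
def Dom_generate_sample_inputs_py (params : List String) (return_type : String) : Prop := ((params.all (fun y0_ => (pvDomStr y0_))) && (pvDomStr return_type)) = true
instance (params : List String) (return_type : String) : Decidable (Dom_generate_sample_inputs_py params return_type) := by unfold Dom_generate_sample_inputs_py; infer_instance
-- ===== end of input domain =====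

-- B is rule-major: a parallel values list initialized to "None" is swept by the keyword
-- rule groups in reverse order (earliest rule wins by overwriting last), then zipped with
-- params into the dict; A walks each parameter through an if/elif chain. Same cost.

-- ===== PORT A =====
-- literal transliteration of A: loop over params, elif chain, samples[param] = value
def generate_sample_inputs_py (params : List String) (return_type : String) : List (String × String) :=
  (params.foldl (fun (samples : PySem.Dict String String) param =>
    let param_lower := PySem.Str.lower param
    if ["id", "num", "count", "qty", "amount"].any (fun x => PySem.Str.isIn x param_lower) then
      -- `'float' in return_type.lower() if return_type else False` (truthiness = nonempty string)
      if (if return_type.toList ≠ [] then PySem.Str.isIn "float" (PySem.Str.lower return_type) = true else False) then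
        samples.insert param "3.14"
      else
        samples.insert param "42"
    else if ["name", "title", "desc", "text", "msg"].any (fun x => PySem.Str.isIn x param_lower) then
      samples.insert param "'test'"
    else if ["email", "mail"].any (fun x => PySem.Str.isIn x param_lower) then
      samples.insert param "'test@example.com'"
    else if ["url", "link", "path"].any (fun x => PySem.Str.isIn x param_lower) then
      samples.insert param "'https://example.com'"
    else if ["flag", "active", "enabled", "is_"].any (fun x => PySem.Str.isIn x param_lower) then
      samples.insert param "True"
    else if ["items", "list", "array", "data"].any (fun x => PySem.Str.isIn x param_lower) then
      samples.insert param "[1, 2, 3]"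
    else
      samples.insert param "None") PySem.Dict.empty).items

-- ===== PORT B =====
-- the rule table of Source B
def pvRules (num_val : String) : List (List String × String) :=
  [ (["id", "num", "count", "qty", "amount"], num_val),
    (["name", "title", "desc", "text", "msg"], "'test'"),
    (["email", "mail"], "'test@example.com'"),
    (["url", "link", "path"], "'https://example.com'"),
    (["flag", "active", "enabled", "is_"], "True"),
    (["items", "list", "array", "data"], "[1, 2, 3]") ]

-- one sweep of Source B's loop body: the zip comprehension over (lowers, vals)
def pvSweep (keywords : List String) (value : String) (lowers vals : List String) : List String :=
  List.zipWith (fun pl w => if keywords.any (fun k => PySem.Str.isIn k pl) then value else w) lowers vals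

def generate_sample_inputs_py_alt (params : List String) (return_type : String) : List (String × String) :=
  let num_val := if (if return_type.toList ≠ [] then PySem.Str.isIn "float" (PySem.Str.lower return_type) = true else False)
                 then "3.14" else "42"
  let lowers := params.map PySem.Str.lower
  let vals0 : List String := params.map (fun _ => "None")   -- ["None"] * len(params)
  -- for keywords, value in reversed(rules): vals = [ ... ]
  let vals := (pvRules num_val).reverse.foldl (fun vals r => pvSweep r.1 r.2 lowers vals) vals0
  -- dict(zip(params, vals))
  ((params.zip vals).foldl (fun (d : PySem.Dict String String) pw => d.insert pw.1 pw.2) PySem.Dict.empty).items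

-- ===== PRECONDITION & SPEC =====
def Spec_generate_sample_inputs_py (params : List String) (return_type : String) (out : List (String × String)) : Prop := out = generate_sample_inputs_py_alt params return_type
instance (params : List String) (return_type : String) (out : List (String × String)) : Decidable (Spec_generate_sample_inputs_py params return_type out) := by unfold Spec_generate_sample_inputs_py; infer_instance

-- ===== CLAIM =====
def Claim_equal_generate_sample_inputs_py : Prop := ∀ (params : List String) (return_type : String), Dom_generate_sample_inputs_py params return_type → Spec_generate_sample_inputs_py params return_type (generate_sample_inputs_py params return_type)

-- ===== LEMMAS AND PROOFS =====

-- a sweep over two maps of the same list is a map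
theorem sweep_map (ks : List String) (v : String) (g : String → String) (xs : List String) :
    pvSweep ks v (xs.map PySem.Str.lower) (xs.map g)
      = xs.map (fun x => if ks.any (fun k => PySem.Str.isIn k (PySem.Str.lower x)) then v else g x) := by
  induction xs with
  | nil => rfl
  | cons x xs ih => simp only [List.map_cons, pvSweep, List.zipWith_cons_cons]; rw [← pvSweep, ih]

-- two folds with pointwise-equal step functions agree
theorem foldl_fun_congr {α β : Type} {f g : β → α → β} (xs : List α) (b : β)
    (h : ∀ d x, f d x = g d x) : xs.foldl f b = xs.foldl g b := by
  induction xs generalizing b with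
  | nil => rfl
  | cons x xs ih => simp [List.foldl_cons, h, ih]

-- zip xs (xs.map h) folded with insert = direct fold of insert x (h x)
theorem zip_map_foldl (xs : List String) (h : String → String) (d : PySem.Dict String String) :
    (xs.zip (xs.map h)).foldl (fun (d : PySem.Dict String String) pw => d.insert pw.1 pw.2) d
      = xs.foldl (fun (d : PySem.Dict String String) x => d.insert x (h x)) d := by
  induction xs generalizing d with
  | nil => rfl
  | cons x xs ih => simp [List.zip_cons_cons, ih]

-- ===== VERDICT =====
theorem generate_sample_inputs_py_spec : Claim_equal_generate_sample_inputs_py := by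
  intro params return_type _
  unfold Spec_generate_sample_inputs_py generate_sample_inputs_py generate_sample_inputs_py_alt
  simp only [pvRules, List.reverse, List.reverseAux, List.foldl_cons, List.foldl_nil,
    sweep_map, zip_map_foldl]
  congr 1
  apply foldl_fun_congr
  intro d p
  split_ifs <;> rfl
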